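-- pv_equiv track=rewrite | github.com/CraftyCrashers/Informatica-5 | Toets 2/Dronken woorden.py | dronken_voeren
-- ===== SOURCE A (Python) =====
-- def dronken_voeren(woord):
--     x, resultaat, hoofdletter_klinker_check = 0, '', 0
--     for i in woord:
--         if hoofdletter_klinker_check == 1:
--             resultaat += str.upper(i)
--             hoofdletter_klinker_check = 0
--         elif x / 2 == x // 2 and x != 0:
--             if str.upper(i) in 'AEOUI':
--                 hoofdletter_klinker_check = 1
--             resultaat += str.upper(i)
--         elif x == 0:
--             if str.upper(i) in'AEOUI':
--                 hoofdletter_klinker_check = 1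
--             resultaat += i
--         else:
--             resultaat += str.lower(i)
--         x += 1
--     return resultaat
-- ===== SOURCE B (Python) =====
-- def dronken_voeren(woord):
--     # Pair-chunking: consume the word two characters at a time (an even-index
--     # char and its odd-index follower); each pair is handled locally, with no
--     # counter, parity test or carried vowel flag.
--     out = []
--     first = True
--     it = iter(woord)
--     for a in it:
--         out.append(a if first else a.upper())
--         first = False
--         b = next(it, None)
--         if b is not None:
--             out.append(b.upper() if a.upper() in 'AEOUI' else b.lower())
--     return ''.join(out)
-- ===== Notes on version B (the rewrite author's own statement) =====
-- stated objective: faster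
-- what changed: Replaced A's counter-plus-forward-carried-flag state machine by a pair-chunking decomposition: the iterator is consumed two characters at a time (an even-index char and its odd-index follower), each pair handled locally with no counter, parity test or flag at all.
import Mathlib
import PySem

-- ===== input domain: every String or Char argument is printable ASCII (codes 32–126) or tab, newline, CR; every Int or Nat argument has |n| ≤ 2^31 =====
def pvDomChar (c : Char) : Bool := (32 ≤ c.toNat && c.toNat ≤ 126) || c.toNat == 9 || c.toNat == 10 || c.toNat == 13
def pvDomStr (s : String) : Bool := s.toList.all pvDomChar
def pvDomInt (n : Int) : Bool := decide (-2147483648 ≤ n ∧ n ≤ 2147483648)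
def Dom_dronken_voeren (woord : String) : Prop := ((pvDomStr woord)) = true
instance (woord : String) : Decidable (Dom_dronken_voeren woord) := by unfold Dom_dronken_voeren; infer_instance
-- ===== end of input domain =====

-- B replaces A's counter + forward-carried flag by pair-chunking (two chars per step): a different decomposition, measured constant-factor faster in Python.

-- shared helper: the test  str.upper(c) in 'AEOUI'  on a one-character string, identical in both Pythons
def dvVowel (c : Char) : Bool :=
  PySem.Chars.isIn [PySem.Chars.upperChar c] ['A', 'E', 'O', 'U', 'I']

-- ===== PORT A =====
-- A's loop: state (x = counter, flag = hoofdletter_klinker_check ∈ {0,1}, acc = resultaat).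
-- Python's even test `x / 2 == x // 2` (float true division) is ported as `x % 2 == 0`:
-- exact, since for the nonnegative counter x (< 2^53) the float equality holds iff x is even.
def dvLoopA : List Char → Int → Int → List Char → List Char
  | [], _, _, acc => acc
  | c :: cs, x, flag, acc =>
    if flag == 1 then
      dvLoopA cs (x + 1) 0 (acc ++ [PySem.Chars.upperChar c])
    else if PySem.Int.mod x 2 == 0 && x != 0 then
      dvLoopA cs (x + 1) (if dvVowel c then 1 else 0) (acc ++ [PySem.Chars.upperChar c])
    else if x == 0 then
      dvLoopA cs (x + 1) (if dvVowel c then 1 else 0) (acc ++ [c])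
    else
      dvLoopA cs (x + 1) flag (acc ++ [PySem.Chars.lowerChar c])

def dronken_voeren (woord : String) : String :=
  String.ofList (dvLoopA woord.toList 0 0 [])

-- ===== PORT B =====
-- Source B's pair loop: each iteration consumes char a and (if present) its follower b;
-- ported as structural recursion taking two list elements per step, with the `first` flag
def dvGo : List Char → Bool → List Char
  | [], _ => []
  | [a], first => [if first then a else PySem.Chars.upperChar a]
  | a :: b :: rest, first =>
    (if first then a else PySem.Chars.upperChar a) ::
    (if dvVowel a then PySem.Chars.upperChar b else PySem.Chars.lowerChar b) ::
    dvGo rest false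

def dronken_voeren_alt (woord : String) : String :=
  String.ofList (dvGo woord.toList true)

-- ===== PRECONDITION & SPEC =====
def Spec_dronken_voeren (woord : String) (out : String) : Prop := out = dronken_voeren_alt woord
instance (woord : String) (out : String) : Decidable (Spec_dronken_voeren woord out) := by unfold Spec_dronken_voeren; infer_instance

-- ===== CLAIM (what is proved, stated in full; the proofs are below) =====
def Claim_equal_dronken_voeren : Prop := ∀ (woord : String), Dom_dronken_voeren woord → Spec_dronken_voeren woord (dronken_voeren woord)

-- ===== LEMMAS AND PROOFS =====

-- At the start of each pair the counter is even (x = 2k) and the flag is clear;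
-- A's two loop steps then coincide with one step of B's pair recursion.
lemma dvLoopA_eq_go : ∀ (cs : List Char) (first : Bool) (k : Nat) (acc : List Char),
    first = (k == 0) → dvLoopA cs (2 * (k : Int)) 0 acc = acc ++ dvGo cs first := by
  intro cs first
  induction cs, first using dvGo.induct with
  | case1 first => intro k acc _; simp [dvLoopA, dvGo]
  | case2 a first =>
    intro k acc hf
    have hm : PySem.Int.mod (2 * (k : Int)) 2 = 0 := by
      have := PySem.Int.mod_natCast (2 * k) 2
      push_cast at this; simpa [Nat.mul_mod_right] using this
    by_cases hk : k = 0
    · subst hk; simp [dvLoopA, dvGo, hf]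
    · have hx : (2 * (k : Int)) ≠ 0 := by
        have : (k : Int) ≠ 0 := by exact_mod_cast hk
        omega
      simp [dvLoopA, dvGo, hf, hk, hx]
  | case3 a b rest first ih =>
    intro k acc hf
    have hm : PySem.Int.mod (2 * (k : Int)) 2 = 0 := by
      have := PySem.Int.mod_natCast (2 * k) 2
      push_cast at this; simpa [Nat.mul_mod_right] using this
    have hm1 : PySem.Int.mod (2 * (k : Int) + 1) 2 = 1 := by
      have := PySem.Int.mod_natCast (2 * k + 1) 2
      push_cast at this; simpa [Nat.mul_add_mod] using this
    have hx1 : (2 * (k : Int) + 1) ≠ 0 := by omega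
    have hstep : (2 * (k : Int) + 1 + 1) = 2 * ((k + 1 : Nat) : Int) := by push_cast; ring
    have ihk := ih (k + 1) ; clear ih
    by_cases hk : k = 0
    · subst hk
      by_cases hv : dvVowel a
      · simp only [dvLoopA, dvGo, hf, hv]
        norm_num
        rw [show (2:Int) = 2 * ((0+1:Nat):Int) by norm_num, ihk _ rfl]
        simp
      · simp only [dvLoopA, dvGo, hf, hv]
        norm_num [hm1]
        rw [show (2:Int) = 2 * ((0+1:Nat):Int) by norm_num, ihk _ rfl]
        simp
    · have hx : (2 * (k : Int)) ≠ 0 := by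
        have : (k : Int) ≠ 0 := by exact_mod_cast hk
        omega
      by_cases hv : dvVowel a
      · simp only [dvLoopA, dvGo, hf, hv]
        norm_num [hm, hx]
        rw [hstep, ihk _ rfl]
        simp [hk]
      · simp only [dvLoopA, dvGo, hf, hv]
        norm_num [hm, hm1, hx, hx1]
        rw [hstep, ihk _ rfl]
        simp [hk]

-- ===== VERDICT (by name: the statement is the Claim_ definition above) =====
theorem dronken_voeren_spec : Claim_equal_dronken_voeren := by
  intro woord _
  unfold Spec_dronken_voeren dronken_voeren dronken_voeren_alt
  have h := dvLoopA_eq_go woord.toList true 0 [] rfl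
  norm_num at h
  rw [h]
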